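-- pv_equiv track=rewrite | github.com/Iusto/Solved.ac | 3085.py | solve
-- ===== SOURCE A (Python) =====
-- def count_max_candies(board):
--     max_candies = 0
--     # 가로 연속 사탕 개수 세기
--     for row in board:
--         count = 1
--         for i in range(1, len(row)):
--             if row[i] == row[i - 1]:
--                 count += 1
--             else:
--                 max_candies = max(max_candies, count)
--                 count = 1
--         max_candies = max(max_candies, count)
--
--     # 세로 연속 사탕 개수 세기
--     for col in range(len(board[0])):
--         count = 1
--         for row in range(1, len(board)):
--             if board[row][col] == board[row - 1][col]:
--                 count += 1
--             else:
--                 max_candies = max(max_candies, count)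
--                 count = 1
--         max_candies = max(max_candies, count)
--
--     return max_candies
--
-- def solve(board):
--     n = len(board)
--     max_candies = 0
--
--     # 모든 인접한 칸을 교환하며 최대 연속 사탕 계산
--     for i in range(n):
--         for j in range(n):
--             # 오른쪽과 교환
--             if j + 1 < n:
--                 board[i][j], board[i][j+1] = board[i][j+1], board[i][j]
--                 max_candies = max(max_candies, count_max_candies(board))
--                 board[i][j], board[i][j+1] = board[i][j+1], board[i][j]
--
--             # 아래쪽과 교환
--             if i + 1 < n:
--                 board[i][j], board[i+1][j] = board[i+1][j], board[i][j]
--                 max_candies = max(max_candies, count_max_candies(board))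
--                 board[i][j], board[i+1][j] = board[i+1][j], board[i][j]
--
--     return max_candies
-- ===== SOURCE B (Python) =====
-- def solve(board):
--     n = len(board)
--     if n < 2:
--         return 0
--     c_cnt = len(board[0])
--
--     def line_max(xs):
--         best, cur = 1, 1
--         for k in range(1, len(xs)):
--             cur = cur + 1 if xs[k] == xs[k - 1] else 1
--             if cur > best:
--                 best = cur
--         return best
--
--     def column(c):
--         return [board[r][c] for r in range(n)]
--
--     row_best = [line_max(r) for r in board]
--     col_best = [line_max(column(c)) for c in range(c_cnt)]
--
--     def best_excluding(vals, skip):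
--         m = 0
--         for k, v in enumerate(vals):
--             if k not in skip and v > m:
--                 m = v
--         return m
--
--     ans = 0
--     for i in range(n):
--         for j in range(n):
--             if j + 1 < n:
--                 row = board[i]
--                 row[j], row[j + 1] = row[j + 1], row[j]
--                 cand = line_max(row)
--                 if j < c_cnt:
--                     cand = max(cand, line_max(column(j)))
--                 if j + 1 < c_cnt:
--                     cand = max(cand, line_max(column(j + 1)))
--                 cand = max(cand, best_excluding(row_best, (i,)),
--                            best_excluding(col_best, (j, j + 1)))
--                 ans = max(ans, cand)
--                 row[j], row[j + 1] = row[j + 1], row[j]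
--             if i + 1 < n:
--                 board[i][j], board[i + 1][j] = board[i + 1][j], board[i][j]
--                 cand = max(line_max(board[i]), line_max(board[i + 1]))
--                 if j < c_cnt:
--                     cand = max(cand, line_max(column(j)))
--                 cand = max(cand, best_excluding(row_best, (i, i + 1)),
--                            best_excluding(col_best, (j,)))
--                 ans = max(ans, cand)
--                 board[i][j], board[i + 1][j] = board[i + 1][j], board[i][j]
--     return ans
-- ===== Notes on version B (the rewrite author's own statement) =====
-- stated objective: faster
-- what changed: Instead of recounting every row and column of the whole board after each of the O(n^2) adjacent swaps, B precomputes each row's and column's best run once and, per swap, recounts only the one or two rows and columns the swap touches, combining them with the cached maxima of all other lines.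
import Mathlib
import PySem

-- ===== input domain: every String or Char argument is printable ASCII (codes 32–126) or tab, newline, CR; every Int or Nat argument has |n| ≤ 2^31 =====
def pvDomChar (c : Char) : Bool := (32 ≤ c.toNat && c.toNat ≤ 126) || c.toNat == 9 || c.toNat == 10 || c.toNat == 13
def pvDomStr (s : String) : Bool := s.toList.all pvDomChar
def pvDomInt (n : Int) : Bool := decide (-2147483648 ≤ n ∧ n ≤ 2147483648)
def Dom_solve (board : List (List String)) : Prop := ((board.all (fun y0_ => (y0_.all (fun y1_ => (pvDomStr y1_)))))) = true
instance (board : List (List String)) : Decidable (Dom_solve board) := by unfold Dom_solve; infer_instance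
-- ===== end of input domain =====

-- B replaces A's full-board recount after every adjacent swap (O(n^4)) by cached per-line maxima
-- plus recounting only the rows/columns the swap touches (O(n^3)); A mutates the board but restores
-- it before returning, so there is no observable side effect and the equivalence is about the value.


-- ===== PORT A =====
-- inner scan of count_max_candies: `for i in range(1, len): if xs[i] == xs[i-1] …`
-- carried structurally (prev = xs[i-1], cnt = count, m = max_candies); exact for in-range indices.
def lineA (m : Int) (prev : String) (rest : List String) (cnt : Int) : Int :=
  match rest with
  | [] => max m cnt
  | x :: xs => if x == prev then lineA m x xs (cnt + 1) else lineA (max m cnt) x xs 1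

-- one line of count_max_candies starting with count = 1 (empty line: the loop is empty, max(m, 1))
def lineStartA (m : Int) (xs : List String) : Int :=
  match xs with
  | [] => max m 1
  | x :: rest => lineA m x rest 1

-- column col read as `board[row][col]`; getD is exact since Pre_ keeps every index in range
def colListA (b : List (List String)) (c : Nat) : List String :=
  b.map (fun row => row.getD c "")

def countMaxA (b : List (List String)) : Int :=
  let m1 := b.foldl (fun m row => lineStartA m row) 0
  (List.range (b.headD []).length).foldl (fun m c => lineStartA m (colListA b c)) m1

-- A swaps two cells in place, measures, and swaps back: ported as measuring the swapped board
def swapHA (b : List (List String)) (i j : Nat) : List (List String) :=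
  let row := b.getD i []
  b.set i ((row.set j (row.getD (j + 1) "")).set (j + 1) (row.getD j ""))

def swapVA (b : List (List String)) (i j : Nat) : List (List String) :=
  let x := (b.getD i []).getD j ""
  let y := (b.getD (i + 1) []).getD j ""
  (b.set i ((b.getD i []).set j y)).set (i + 1) ((b.getD (i + 1) []).set j x)

def solve (board : List (List String)) : Int :=
  let n := board.length
  (List.range n).foldl (fun m i =>
    (List.range n).foldl (fun m j =>
      let m1 := if j + 1 < n then max m (countMaxA (swapHA board i j)) else m
      if i + 1 < n then max m1 (countMaxA (swapVA board i j)) else m1) m) 0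

-- ===== PORT B =====
-- B's line_max: best/cur scan over adjacent pairs (prev carries xs[k-1]); exact for in-range indices
def runGo (prev : String) (rest : List String) (best cur : Int) : Int :=
  match rest with
  | [] => best
  | x :: xs =>
    let cur' := if x == prev then cur + 1 else 1
    runGo x xs (if cur' > best then cur' else best) cur'

def lineMaxB (xs : List String) : Int :=
  match xs with
  | [] => 1
  | x :: rest => runGo x rest 1 1

def colB (b : List (List String)) (c : Nat) : List String :=
  b.map (fun row => row.getD c "")

-- best_excluding: linear pass over enumerate(vals) skipping the given indices
def bestExcl (vals : List Int) (skip : List Int) : Int :=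
  (PySem.List.enumerate vals).foldl
    (fun m kv => if ¬ (kv.1 ∈ skip) ∧ kv.2 > m then kv.2 else m) 0

def solve_alt (board : List (List String)) : Int :=
  let n := board.length
  if n < 2 then 0 else
  let C := (board.headD []).length
  let rowBest := board.map lineMaxB
  let colBest := (List.range C).map (fun c => lineMaxB (colB board c))
  (List.range n).foldl (fun a i =>
    (List.range n).foldl (fun a j =>
      let a1 :=
        if j + 1 < n then
          let row := board.getD i []
          let row' := (row.set j (row.getD (j + 1) "")).set (j + 1) (row.getD j "")
          let b' := board.set i row'
          let cand := lineMaxB row'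
          let cand := if j < C then max cand (lineMaxB (colB b' j)) else cand
          let cand := if j + 1 < C then max cand (lineMaxB (colB b' (j + 1))) else cand
          let cand := max (max cand (bestExcl rowBest [(i : Int)]))
                          (bestExcl colBest [(j : Int), (j : Int) + 1])
          max a cand
        else a
      if i + 1 < n then
        let x := (board.getD i []).getD j ""
        let y := (board.getD (i + 1) []).getD j ""
        let ri' := (board.getD i []).set j y
        let ri1' := (board.getD (i + 1) []).set j x
        let b' := (board.set i ri').set (i + 1) ri1'
        let cand := max (lineMaxB ri') (lineMaxB ri1')
        let cand := if j < C then max cand (lineMaxB (colB b' j)) else cand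
        let cand := max (max cand (bestExcl rowBest [(i : Int), (i : Int) + 1]))
                        (bestExcl colBest [(j : Int)])
        max a1 cand
      else a1) a) 0

-- ===== PRECONDITION & SPEC =====
-- Pre_ excludes exactly the inputs where A raises IndexError: boards with at least two rows in which
-- some row is shorter than the row count or than the first row (the swap loop indexes columns 0..n-1
-- and the vertical count indexes every row up to len(board[0])); A returns on everything admitted.
def Pre_solve (board : List (List String)) : Prop :=
  (decide (board.length ≤ 1)
    || board.all (fun row => decide (board.length ≤ row.length)
        && decide ((board.headD []).length ≤ row.length))) = true
instance (board : List (List String)) : Decidable (Pre_solve board) := by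
  unfold Pre_solve; infer_instance

def pvWitness_solve : List (List String) := [["a", "b"], ["b", "a"]]

def Spec_solve (board : List (List String)) (out : Int) : Prop := out = solve_alt board
instance (board : List (List String)) (out : Int) : Decidable (Spec_solve board out) := by
  unfold Spec_solve; infer_instance

-- ===== CLAIM (what is proved, stated in full; the proofs are below) =====
def Claim_equal_solve : Prop :=
  ∀ (board : List (List String)), Dom_solve board → Pre_solve board → Spec_solve board (solve board)

-- ===== LEMMAS AND PROOFS =====

-- running maximum of a list of values, floored at 0 (the shape of all of A's accumulators)
def M (l : List Int) : Int := l.foldl max 0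

-- the value one line (row or column) contributes in A
def lineVal (xs : List String) : Int := lineStartA 0 xs

-- all line values of a board, rows then columns: countMaxA is their M
def allVals (b : List (List String)) : List Int :=
  b.map lineVal ++ (List.range (b.headD []).length).map (fun c => lineVal (colListA b c))

lemma M_nonneg (l : List Int) : 0 ≤ M l := (PySem.List.le_foldl_max l 0).1

lemma le_M {l : List Int} {a : Int} (h : a ∈ l) : a ≤ M l := (PySem.List.le_foldl_max l 0).2 a h

lemma M_le {l : List Int} {c : Int} (h0 : 0 ≤ c) (h : ∀ a ∈ l, a ≤ c) : M l ≤ c := by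
  rcases PySem.List.foldl_max_mem l 0 with h1 | h1
  · rw [M, h1]; exact h0
  · exact h _ h1

lemma foldl_max_eq (l : List Int) (a : Int) (h : 0 ≤ a) : l.foldl max a = max a (M l) := by
  induction l generalizing a with
  | nil => simp [M]; omega
  | cons x xs ih =>
    have h0 := M_nonneg xs
    have h1 : xs.foldl max (max 0 x) = max (max 0 x) (M xs) := ih _ (by omega)
    have h2 : xs.foldl max (max a x) = max (max a x) (M xs) := ih _ (by omega)
    simp only [List.foldl_cons, M, h1, h2]; omega

lemma M_cons (v : Int) (vs : List Int) : M (v :: vs) = max (max 0 v) (M vs) := by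
  simp only [M, List.foldl_cons]
  exact foldl_max_eq vs (max 0 v) (by omega)

lemma M_append (l1 l2 : List Int) : M (l1 ++ l2) = max (M l1) (M l2) := by
  have h1 := M_nonneg l1
  simp only [M, List.foldl_append]
  exact foldl_max_eq l2 (l1.foldl max 0) h1

-- A's accumulator passes through lineA only via max
lemma lineA_thread (rest : List String) (prev : String) (m cnt : Int) (h : 0 ≤ cnt) :
    lineA m prev rest cnt = max m (lineA 0 prev rest cnt) := by
  induction rest generalizing prev m cnt with
  | nil => simp only [lineA]; omega
  | cons x xs ih =>
    rw [lineA, lineA]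
    by_cases hx : (x == prev) = true
    · rw [if_pos hx, if_pos hx, ih x m (cnt + 1) (by omega)]
    · rw [if_neg hx, if_neg hx, ih x (max m cnt) 1 (by omega), ih x (max 0 cnt) 1 (by omega)]
      omega

lemma lineStartA_thread (m : Int) (xs : List String) :
    lineStartA m xs = max m (lineVal xs) := by
  cases xs with
  | nil => simp only [lineStartA, lineVal]; omega
  | cons x rest => exact lineA_thread rest x m 1 (by omega)

lemma lineVal_pos (xs : List String) : 1 ≤ lineVal xs := by
  have key : ∀ (rest : List String) (prev : String) (m cnt : Int),
      max m cnt ≤ lineA m prev rest cnt := by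
    intro rest
    induction rest with
    | nil => intro prev m cnt; simp [lineA]
    | cons x xs ih =>
      intro prev m cnt
      rw [lineA]
      by_cases hx : (x == prev) = true
      · rw [if_pos hx]
        have := ih x m (cnt + 1); omega
      · rw [if_neg hx]
        have := ih x (max m cnt) 1; omega
  cases xs with
  | nil => simp [lineVal, lineStartA]
  | cons x rest =>
    have := key rest x 0 1
    simp only [lineVal, lineStartA]; omega

-- a fold of `lineStartA m (g x)` is the floored maximum of the projected line values
lemma foldl_lineStartA {α : Type} (g : α → List String) (l : List α) (a : Int) (ha : 0 ≤ a) :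
    l.foldl (fun m x => lineStartA m (g x)) a = max a (M (l.map (fun x => lineVal (g x)))) := by
  induction l generalizing a with
  | nil => simp [M]; omega
  | cons x xs ih =>
    have hp := lineVal_pos (g x)
    have h0 := M_nonneg (xs.map (fun x => lineVal (g x)))
    rw [List.foldl_cons, lineStartA_thread, ih _ (by omega), List.map_cons, M_cons]
    omega

lemma countMaxA_eq_M (b : List (List String)) : countMaxA b = M (allVals b) := by
  have h1 : b.foldl (fun m row => lineStartA m row) 0 = max 0 (M (b.map lineVal)) :=
    foldl_lineStartA (fun r => r) b 0 le_rfl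
  have hr0 := M_nonneg (b.map lineVal)
  have h2 : (List.range (b.headD []).length).foldl
        (fun m c => lineStartA m (colListA b c)) (b.foldl (fun m row => lineStartA m row) 0)
      = max (b.foldl (fun m row => lineStartA m row) 0)
          (M ((List.range (b.headD []).length).map (fun c => lineVal (colListA b c)))) :=
    foldl_lineStartA (fun c => colListA b c) _ _ (by omega)
  have hc0 := M_nonneg ((List.range (b.headD []).length).map (fun c => lineVal (colListA b c)))
  simp only [countMaxA]
  rw [h2, h1]
  simp only [allVals, M_append]
  omega

-- B's scan computes the same line value as A's
lemma lineA_runGo (rest : List String) (prev : String) (m cnt : Int) :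
    lineA m prev rest cnt = runGo prev rest (max m cnt) cnt := by
  induction rest generalizing prev m cnt with
  | nil => simp [lineA, runGo]
  | cons x xs ih =>
    rw [lineA, runGo]
    by_cases hx : (x == prev) = true
    · rw [if_pos hx, if_pos hx, ih x m (cnt + 1)]
      congr 1
      omega
    · rw [if_neg hx, if_neg hx, ih x (max m cnt) 1]
      congr 1
      omega

lemma lineMaxB_eq_lineVal (xs : List String) : lineMaxB xs = lineVal xs := by
  cases xs with
  | nil => simp [lineMaxB, lineVal, lineStartA]
  | cons x rest =>
    have h := lineA_runGo rest x 0 1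
    simp only [lineMaxB, lineVal, lineStartA, h]
    norm_num

-- bestExcl is the floored maximum of the values at the indices that are kept
lemma bestExcl_gen (skip : List Int) (l : List (Int × Int)) (a : Int) (ha : 0 ≤ a) :
    l.foldl (fun m kv => if ¬ (kv.1 ∈ skip) ∧ kv.2 > m then kv.2 else m) a
      = max a (M ((l.filter (fun kv => ¬ (kv.1 ∈ skip))).map (·.2))) := by
  induction l generalizing a with
  | nil => simp [M]; omega
  | cons kv l ih =>
    by_cases hk : kv.1 ∈ skip
    · have hstep : (if ¬ (kv.1 ∈ skip) ∧ kv.2 > a then kv.2 else a) = a := by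
        rw [if_neg]; intro hc; exact hc.1 hk
      rw [List.foldl_cons, hstep, List.filter_cons_of_neg (by simpa using hk)]
      exact ih a ha
    · have hstep : (if ¬ (kv.1 ∈ skip) ∧ kv.2 > a then kv.2 else a) = max a kv.2 := by
        by_cases hv : kv.2 > a
        · rw [if_pos ⟨hk, hv⟩]; omega
        · rw [if_neg (by intro hc; exact hv hc.2)]; omega
      rw [List.foldl_cons, hstep, List.filter_cons_of_pos (by simpa using hk),
          List.map_cons, M_cons, ih (max a kv.2) (by omega)]
      have h0 := M_nonneg ((l.filter (fun kv => ¬ (kv.1 ∈ skip))).map (·.2))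
      omega

lemma bestExcl_eq (vals skip : List Int) :
    bestExcl vals skip
      = M (((PySem.List.enumerate vals).filter (fun kv => ¬ (kv.1 ∈ skip))).map (·.2)) := by
  have h := bestExcl_gen skip (PySem.List.enumerate vals) 0 le_rfl
  have h0 := M_nonneg (((PySem.List.enumerate vals).filter (fun kv => ¬ (kv.1 ∈ skip))).map (·.2))
  rw [bestExcl, h]
  omega

lemma bestExcl_nonneg (vals skip : List Int) : 0 ≤ bestExcl vals skip := by
  rw [bestExcl_eq]; exact M_nonneg _

lemma le_bestExcl {vals : List Int} {skip : List Int} {k : Nat}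
    (hk : k < vals.length) (hs : ¬ ((k : Int) ∈ skip)) : vals[k] ≤ bestExcl vals skip := by
  rw [bestExcl_eq]
  apply le_M
  apply List.mem_map.mpr
  refine ⟨((k : Int), vals[k]), ?_, rfl⟩
  apply List.mem_filter.mpr
  exact ⟨(PySem.List.mem_enumerate_iff vals 0 _).mpr ⟨k, hk, by simp⟩, by simpa using hs⟩

lemma bestExcl_le {vals : List Int} {skip : List Int} {c : Int} (h0 : 0 ≤ c)
    (h : ∀ k : Nat, (hk : k < vals.length) → ¬ ((k : Int) ∈ skip) → vals[k] ≤ c) :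
    bestExcl vals skip ≤ c := by
  rw [bestExcl_eq]
  apply M_le h0
  intro a ha
  rcases List.mem_map.mp ha with ⟨kv, hkv, rfl⟩
  rcases List.mem_filter.mp hkv with ⟨hmem, hcond⟩
  rcases (PySem.List.mem_enumerate_iff vals 0 kv).mp hmem with ⟨k, hklt, rfl⟩
  simp only [zero_add] at hcond ⊢
  exact h k hklt (by simpa using hcond)

-- list plumbing
lemma getD_set_ne {α : Type} (l : List α) (i j : Nat) (v d : α) (h : i ≠ j) :
    (l.set i v).getD j d = l.getD j d := by
  simp [List.getD_eq_getElem?_getD, List.getElem?_set_ne h]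

lemma headD_getElem {α : Type} (l : List α) (h : 0 < l.length) (d : α) : l.headD d = l[0] := by
  cases l with
  | nil => simp at h
  | cons x t => rfl

-- replacing row i does not change a column the new row agrees on
lemma colListA_set_row (b : List (List String)) (i : Nat) (r : List String) (c : Nat)
    (h : (b.getD i []).getD c "" = r.getD c "") :
    colListA (b.set i r) c = colListA b c := by
  apply List.ext_getElem
  · simp [colListA]
  · intro k hk1 hk2
    simp only [colListA, List.getElem_map]
    have hkb : k < b.length := by simpa [colListA] using hk2
    by_cases hki : k = i
    · subst hki
      have hset : (b.set k r)[k]'(by simpa using hkb) = r := by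
        rw [List.getElem_set, if_pos rfl]
      rw [hset, ← h, List.getD_eq_getElem b [] hkb]
    · have hset : (b.set i r)[k]'(by simpa using hkb) = b[k] := by
        rw [List.getElem_set, if_neg (fun h' => hki h'.symm)]
      rw [hset]

lemma colB_eq_colListA (b : List (List String)) (c : Nat) : colB b c = colListA b c := rfl

-- a horizontal swap changes row i and columns j, j+1 only; its full recount is B's candidate
lemma swapH_eq (b : List (List String)) (i j : Nat) (row' : List String) (b' : List (List String))
    (hrow' : row' = ((b.getD i []).set j ((b.getD i []).getD (j + 1) "")).set (j + 1) ((b.getD i []).getD j ""))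
    (hb' : b' = b.set i row')
    (hrows : ∀ row ∈ b, b.length ≤ row.length ∧ (b.headD []).length ≤ row.length)
    (hi : i < b.length) (hj : j + 1 < b.length) :
    countMaxA (swapHA b i j) =
      max (max (max (max (lineMaxB row') (lineMaxB (colB b' j))) (lineMaxB (colB b' (j + 1))))
          (bestExcl (b.map lineMaxB) [(i : Int)]))
        (bestExcl ((List.range (b.headD []).length).map (fun c => lineMaxB (colB b c)))
          [(j : Int), (j : Int) + 1]) := by
  have h0 : 0 < b.length := by omega
  have hbC : b.length ≤ (b.headD []).length := by
    have hm : b.headD [] ∈ b := by rw [headD_getElem b h0]; exact List.getElem_mem _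
    exact (hrows _ hm).1
  have hswap : swapHA b i j = b' := by rw [hb', hrow']; rfl
  have hlen : b'.length = b.length := by rw [hb']; simp
  have hrow'len : row'.length = (b.getD i []).length := by rw [hrow']; simp
  have hb'k : ∀ (k : Nat) (hk1 : k < b'.length) (hk2 : k < b.length),
      b'[k] = if i = k then row' else b[k] := by
    intro k hk1 hk2
    simp [hb', List.getElem_set]
  have hC' : (b'.headD []).length = (b.headD []).length := by
    have h0' : 0 < b'.length := by omega
    rw [headD_getElem b' h0', hb'k 0 h0' h0]
    by_cases hi0 : i = 0
    · subst hi0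
      rw [if_pos rfl, hrow'len, List.getD_eq_getElem b [] h0, headD_getElem b h0]
    · rw [if_neg hi0, headD_getElem b h0]
  have hcol : ∀ c : Nat, c ≠ j → c ≠ j + 1 → colListA b' c = colListA b c := by
    intro c h1 h2
    rw [hb']
    apply colListA_set_row
    rw [hrow', getD_set_ne _ (j + 1) c _ _ (fun h => h2 h.symm),
        getD_set_ne _ j c _ _ (fun h => h1 h.symm)]
  have hrB : (b.map lineMaxB).length = b.length := by simp
  have hcB : ((List.range (b.headD []).length).map (fun c => lineMaxB (colB b c))).length
      = (b.headD []).length := by simp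
  rw [hswap, countMaxA_eq_M]
  simp only [allVals]
  rw [hC']
  have hne1 := bestExcl_nonneg (b.map lineMaxB) [(i : Int)]
  have hne2 := bestExcl_nonneg
    ((List.range (b.headD []).length).map (fun c => lineMaxB (colB b c))) [(j : Int), (j : Int) + 1]
  apply le_antisymm
  · apply M_le (by omega)
    intro a ha
    rcases List.mem_append.mp ha with h | h
    · rcases List.mem_map.mp h with ⟨r, hr, rfl⟩
      rcases List.mem_iff_getElem.mp hr with ⟨k, hk, hkr⟩
      have hkb : k < b.length := by omega
      rw [← hkr, hb'k k hk hkb]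
      by_cases hki : i = k
      · rw [if_pos hki, ← lineMaxB_eq_lineVal]
        omega
      · rw [if_neg hki, ← lineMaxB_eq_lineVal]
        have hks : ¬ ((k : Int) ∈ [(i : Int)]) := by
          simp only [List.mem_singleton]
          omega
        have hle := le_bestExcl (vals := b.map lineMaxB) (skip := [(i : Int)])
          (k := k) (by omega) hks
        rw [List.getElem_map] at hle
        omega
    · rcases List.mem_map.mp h with ⟨c, hc, rfl⟩
      have hcC : c < (b.headD []).length := List.mem_range.mp hc
      by_cases hcj : c = j
      · subst hcj
        rw [← colB_eq_colListA, ← lineMaxB_eq_lineVal]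
        omega
      · by_cases hcj1 : c = j + 1
        · subst hcj1
          rw [← colB_eq_colListA, ← lineMaxB_eq_lineVal]
          omega
        · rw [hcol c hcj hcj1]
          have hks : ¬ ((c : Int) ∈ [(j : Int), (j : Int) + 1]) := by
            simp only [List.mem_cons, List.not_mem_nil, or_false]
            omega
          have hle := le_bestExcl
            (vals := (List.range (b.headD []).length).map (fun c => lineMaxB (colB b c)))
            (skip := [(j : Int), (j : Int) + 1]) (k := c) (by omega) hks
          have hgc : ((List.range (b.headD []).length).map
              (fun c => lineMaxB (colB b c)))[c]'(by omega) = lineMaxB (colB b c) := by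
            simp
          rw [hgc, colB_eq_colListA, lineMaxB_eq_lineVal] at hle
          omega
  · have hMn := M_nonneg (b'.map lineVal
      ++ (List.range (b.headD []).length).map (fun c => lineVal (colListA b' c)))
    have h1 : lineMaxB row' ≤ M (b'.map lineVal
        ++ (List.range (b.headD []).length).map (fun c => lineVal (colListA b' c))) := by
      rw [lineMaxB_eq_lineVal]
      apply le_M
      apply List.mem_append_left
      apply List.mem_map.mpr
      refine ⟨row', ?_, rfl⟩
      apply List.mem_iff_getElem.mpr
      exact ⟨i, by omega, by rw [hb'k i (by omega) hi, if_pos rfl]⟩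
    have hcolmem : ∀ c : Nat, c < (b.headD []).length →
        lineMaxB (colB b' c) ≤ M (b'.map lineVal
          ++ (List.range (b.headD []).length).map (fun c => lineVal (colListA b' c))) := by
      intro c hc
      rw [colB_eq_colListA, lineMaxB_eq_lineVal]
      apply le_M
      apply List.mem_append_right
      exact List.mem_map.mpr ⟨c, List.mem_range.mpr hc, rfl⟩
    have h2 := hcolmem j (by omega)
    have h3 := hcolmem (j + 1) (by omega)
    have h4 : bestExcl (b.map lineMaxB) [(i : Int)] ≤ M (b'.map lineVal
        ++ (List.range (b.headD []).length).map (fun c => lineVal (colListA b' c))) := by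
      apply bestExcl_le (by omega)
      intro k hk hks
      have hki : ¬ (i = k) := by
        simp only [List.mem_singleton] at hks
        omega
      rw [List.getElem_map, lineMaxB_eq_lineVal]
      have hkb : k < b.length := by omega
      have : b[k] = b'[k]'(by omega) := by rw [hb'k k (by omega) hkb, if_neg hki]
      rw [this]
      apply le_M
      apply List.mem_append_left
      exact List.mem_map.mpr ⟨_, List.getElem_mem _, rfl⟩
    have h5 : bestExcl ((List.range (b.headD []).length).map (fun c => lineMaxB (colB b c)))
        [(j : Int), (j : Int) + 1] ≤ M (b'.map lineVal
        ++ (List.range (b.headD []).length).map (fun c => lineVal (colListA b' c))) := by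
      apply bestExcl_le (by omega)
      intro c hc hks
      have hcC : c < (b.headD []).length := by omega
      have hcj : c ≠ j ∧ c ≠ j + 1 := by
        simp only [List.mem_cons, List.not_mem_nil, or_false] at hks
        omega
      have hgc : ((List.range (b.headD []).length).map
          (fun c => lineMaxB (colB b c)))[c]'hc = lineMaxB (colB b c) := by simp
      rw [hgc, colB_eq_colListA, lineMaxB_eq_lineVal, ← hcol c hcj.1 hcj.2]
      apply le_M
      apply List.mem_append_right
      exact List.mem_map.mpr ⟨c, List.mem_range.mpr hcC, rfl⟩
    omega

-- a vertical swap changes rows i, i+1 and column j only; its full recount is B's candidate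
lemma swapV_eq (b : List (List String)) (i j : Nat) (ri' ri1' : List String)
    (b2 : List (List String))
    (hri : ri' = (b.getD i []).set j ((b.getD (i + 1) []).getD j ""))
    (hri1 : ri1' = (b.getD (i + 1) []).set j ((b.getD i []).getD j ""))
    (hb2 : b2 = (b.set i ri').set (i + 1) ri1')
    (hrows : ∀ row ∈ b, b.length ≤ row.length ∧ (b.headD []).length ≤ row.length)
    (hi1 : i + 1 < b.length) (hj : j < b.length) :
    countMaxA (swapVA b i j) =
      max (max (max (max (lineMaxB ri') (lineMaxB ri1')) (lineMaxB (colB b2 j)))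
          (bestExcl (b.map lineMaxB) [(i : Int), (i : Int) + 1]))
        (bestExcl ((List.range (b.headD []).length).map (fun c => lineMaxB (colB b c)))
          [(j : Int)]) := by
  have h0 : 0 < b.length := by omega
  have hbC : b.length ≤ (b.headD []).length := by
    have hm : b.headD [] ∈ b := by rw [headD_getElem b h0]; exact List.getElem_mem _
    exact (hrows _ hm).1
  have hswap : swapVA b i j = b2 := by rw [hb2, hri, hri1]; rfl
  have hlen : b2.length = b.length := by rw [hb2]; simp
  have hri'len : ri'.length = (b.getD i []).length := by rw [hri]; simp
  have hb2k : ∀ (k : Nat) (hk1 : k < b2.length) (hk2 : k < b.length),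
      b2[k] = if i + 1 = k then ri1' else if i = k then ri' else b[k] := by
    intro k hk1 hk2
    simp [hb2, List.getElem_set]
  have hC' : (b2.headD []).length = (b.headD []).length := by
    have h0' : 0 < b2.length := by omega
    rw [headD_getElem b2 h0', hb2k 0 h0' h0, if_neg (by omega)]
    by_cases hi0 : i = 0
    · subst hi0
      rw [if_pos rfl, hri'len, List.getD_eq_getElem b [] h0, headD_getElem b h0]
    · rw [if_neg hi0, headD_getElem b h0]
  have hcol : ∀ c : Nat, c ≠ j → colListA b2 c = colListA b c := by
    intro c h1
    rw [hb2]
    have houter : colListA ((b.set i ri').set (i + 1) ri1') c = colListA (b.set i ri') c := by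
      apply colListA_set_row
      rw [getD_set_ne _ i (i + 1) _ _ (by omega), hri1,
          getD_set_ne _ j c _ _ (fun h => h1 h.symm)]
    rw [houter]
    apply colListA_set_row
    rw [hri, getD_set_ne _ j c _ _ (fun h => h1 h.symm)]
  rw [hswap, countMaxA_eq_M]
  simp only [allVals]
  rw [hC']
  have hne1 := bestExcl_nonneg (b.map lineMaxB) [(i : Int), (i : Int) + 1]
  have hne2 := bestExcl_nonneg
    ((List.range (b.headD []).length).map (fun c => lineMaxB (colB b c))) [(j : Int)]
  have hrB : (b.map lineMaxB).length = b.length := by simp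
  have hcB : ((List.range (b.headD []).length).map (fun c => lineMaxB (colB b c))).length
      = (b.headD []).length := by simp
  apply le_antisymm
  · apply M_le (by omega)
    intro a ha
    rcases List.mem_append.mp ha with h | h
    · rcases List.mem_map.mp h with ⟨r, hr, rfl⟩
      rcases List.mem_iff_getElem.mp hr with ⟨k, hk, hkr⟩
      have hkb : k < b.length := by omega
      rw [← hkr, hb2k k hk hkb]
      by_cases hki1 : i + 1 = k
      · rw [if_pos hki1, ← lineMaxB_eq_lineVal]
        omega
      · rw [if_neg hki1]
        by_cases hki : i = k
        · rw [if_pos hki, ← lineMaxB_eq_lineVal]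
          omega
        · rw [if_neg hki, ← lineMaxB_eq_lineVal]
          have hks : ¬ ((k : Int) ∈ [(i : Int), (i : Int) + 1]) := by
            simp only [List.mem_cons, List.not_mem_nil, or_false]
            omega
          have hle := le_bestExcl (vals := b.map lineMaxB)
            (skip := [(i : Int), (i : Int) + 1]) (k := k) (by omega) hks
          rw [List.getElem_map] at hle
          omega
    · rcases List.mem_map.mp h with ⟨c, hc, rfl⟩
      have hcC : c < (b.headD []).length := List.mem_range.mp hc
      by_cases hcj : c = j
      · subst hcj
        rw [← colB_eq_colListA, ← lineMaxB_eq_lineVal]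
        omega
      · rw [hcol c hcj]
        have hks : ¬ ((c : Int) ∈ [(j : Int)]) := by
          simp only [List.mem_singleton]
          omega
        have hle := le_bestExcl
          (vals := (List.range (b.headD []).length).map (fun c => lineMaxB (colB b c)))
          (skip := [(j : Int)]) (k := c) (by omega) hks
        have hgc : ((List.range (b.headD []).length).map
            (fun c => lineMaxB (colB b c)))[c]'(by omega) = lineMaxB (colB b c) := by
          simp
        rw [hgc, colB_eq_colListA, lineMaxB_eq_lineVal] at hle
        omega
  · have hMn := M_nonneg (b2.map lineVal
      ++ (List.range (b.headD []).length).map (fun c => lineVal (colListA b2 c)))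
    have hrmem : ∀ (k : Nat) (hk : k < b.length),
        lineVal (b2[k]'(by omega)) ≤ M (b2.map lineVal
          ++ (List.range (b.headD []).length).map (fun c => lineVal (colListA b2 c))) := by
      intro k hk
      apply le_M
      apply List.mem_append_left
      exact List.mem_map.mpr ⟨_, List.getElem_mem _, rfl⟩
    have h1 : lineMaxB ri' ≤ M (b2.map lineVal
        ++ (List.range (b.headD []).length).map (fun c => lineVal (colListA b2 c))) := by
      rw [lineMaxB_eq_lineVal]
      have := hrmem i (by omega)
      rwa [hb2k i (by omega) (by omega), if_neg (by omega), if_pos rfl] at this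
    have h1' : lineMaxB ri1' ≤ M (b2.map lineVal
        ++ (List.range (b.headD []).length).map (fun c => lineVal (colListA b2 c))) := by
      rw [lineMaxB_eq_lineVal]
      have := hrmem (i + 1) (by omega)
      rwa [hb2k (i + 1) (by omega) (by omega), if_pos rfl] at this
    have h2 : lineMaxB (colB b2 j) ≤ M (b2.map lineVal
        ++ (List.range (b.headD []).length).map (fun c => lineVal (colListA b2 c))) := by
      rw [colB_eq_colListA, lineMaxB_eq_lineVal]
      apply le_M
      apply List.mem_append_right
      exact List.mem_map.mpr ⟨j, List.mem_range.mpr (by omega), rfl⟩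
    have h4 : bestExcl (b.map lineMaxB) [(i : Int), (i : Int) + 1] ≤ M (b2.map lineVal
        ++ (List.range (b.headD []).length).map (fun c => lineVal (colListA b2 c))) := by
      apply bestExcl_le (by omega)
      intro k hk hks
      have hki : ¬ (i = k) ∧ ¬ (i + 1 = k) := by
        simp only [List.mem_cons, List.not_mem_nil, or_false] at hks
        omega
      rw [List.getElem_map, lineMaxB_eq_lineVal]
      have hkb : k < b.length := by omega
      have heq : b[k] = b2[k]'(by omega) := by
        rw [hb2k k (by omega) hkb, if_neg hki.2, if_neg hki.1]
      rw [heq]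
      exact hrmem k hkb
    have h5 : bestExcl ((List.range (b.headD []).length).map (fun c => lineMaxB (colB b c)))
        [(j : Int)] ≤ M (b2.map lineVal
        ++ (List.range (b.headD []).length).map (fun c => lineVal (colListA b2 c))) := by
      apply bestExcl_le (by omega)
      intro c hc hks
      have hcC : c < (b.headD []).length := by omega
      have hcj : c ≠ j := by
        simp only [List.mem_singleton] at hks
        omega
      have hgc : ((List.range (b.headD []).length).map
          (fun c => lineMaxB (colB b c)))[c]'hc = lineMaxB (colB b c) := by simp
      rw [hgc, colB_eq_colListA, lineMaxB_eq_lineVal, ← hcol c hcj]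
      apply le_M
      apply List.mem_append_right
      exact List.mem_map.mpr ⟨c, List.mem_range.mpr hcC, rfl⟩
    omega

lemma small_case (b : List (List String)) (h : b.length ≤ 1) : solve b = solve_alt b := by
  match b with
  | [] => rfl
  | [r] => rfl
  | x :: y :: t => simp at h

lemma main_case (b : List (List String)) (hn : 2 ≤ b.length)
    (hrows : ∀ row ∈ b, b.length ≤ row.length ∧ (b.headD []).length ≤ row.length) :
    solve b = solve_alt b := by
  have h0 : 0 < b.length := by omega
  have hbC : b.length ≤ (b.headD []).length := by
    have hm : b.headD [] ∈ b := by rw [headD_getElem b h0]; exact List.getElem_mem _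
    exact (hrows _ hm).1
  simp only [solve, solve_alt]
  rw [if_neg (by omega)]
  apply PySem.List.foldl_congr_mem
  intro acc i hi
  apply PySem.List.foldl_congr_mem
  intro acc2 j hj
  rw [List.mem_range] at hi hj
  by_cases hj1 : j + 1 < b.length
  · by_cases hi1 : i + 1 < b.length
    · rw [if_pos hj1, if_pos hj1, if_pos hi1, if_pos hi1,
          if_pos (show j < (b.headD []).length by omega),
          if_pos (show j + 1 < (b.headD []).length by omega),
          if_pos (show j < (b.headD []).length by omega),
          swapH_eq b i j _ _ rfl rfl hrows hi hj1,
          swapV_eq b i j _ _ _ rfl rfl rfl hrows hi1 hj]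
    · rw [if_pos hj1, if_pos hj1, if_neg hi1, if_neg hi1,
          if_pos (show j < (b.headD []).length by omega),
          if_pos (show j + 1 < (b.headD []).length by omega),
          swapH_eq b i j _ _ rfl rfl hrows hi hj1]
  · by_cases hi1 : i + 1 < b.length
    · rw [if_neg hj1, if_neg hj1, if_pos hi1, if_pos hi1,
          if_pos (show j < (b.headD []).length by omega),
          swapV_eq b i j _ _ _ rfl rfl rfl hrows hi1 hj]
    · rw [if_neg hj1, if_neg hj1, if_neg hi1, if_neg hi1]

-- ===== VERDICT (by name: the statement is the Claim_ definition above) =====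
theorem solve_spec : Claim_equal_solve := by
  intro board _ hPre
  unfold Spec_solve
  rw [Pre_solve] at hPre
  simp only [Bool.or_eq_true, decide_eq_true_eq, List.all_eq_true, Bool.and_eq_true] at hPre
  rcases hPre with h | h
  · exact small_case board h
  · by_cases hn : board.length ≤ 1
    · exact small_case board hn
    · exact main_case board (by omega) h
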